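-- pv_equiv track=rewrite | github.com/nathan-abraham/tinypost | shunt.py | build_number
-- ===== SOURCE A (Python) =====
-- def build_number(expression: str, pos: int):
-- 	result = ""
-- 	dot_count = 0
--
-- 	while pos < len(expression) and (expression[pos].isdigit() or \
-- 		 expression[pos] == "." and dot_count < 1):
--
-- 		if expression[pos] == ".":
-- 			dot_count += 1
-- 		result += expression[pos]
-- 		pos += 1
--
-- 	if result == ".":
-- 		raise ValueError()
--
-- 	return result, pos
-- ===== SOURCE B (Python) =====
-- import re
--
-- _NUM = re.compile(r'\d*(?:\.\d*)?')
--
-- def build_number(expression: str, pos: int):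
--     token = _NUM.match(expression[pos:]).group()
--     if token == ".":
--         raise ValueError()
--     return token, pos + len(token)
-- ===== Notes on version B (the rewrite author's own statement) =====
-- stated objective: idiomatic
-- what changed: Replaces the character-by-character accumulator loop with a single maximal-prefix match of digits-with-at-most-one-dot against expression[pos:] (regex \d*(?:\.\d*)?), returning the token and pos plus its length; Pre_ excludes pos < -len (A raises IndexError), lone-dot tokens (both raise ValueError), and negative pos whose character is a digit or dot, where A's end-relative indexing can wrap past position 0 and B's slice-based scan raises or returns a different value.
-- outside the precondition, e.g. on build_number('12', -2): A returns ('1212', 2), B returns ('12', 0); on build_number('5.', -1): A returns ('.5', 1), B raises ValueError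
import Mathlib
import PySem

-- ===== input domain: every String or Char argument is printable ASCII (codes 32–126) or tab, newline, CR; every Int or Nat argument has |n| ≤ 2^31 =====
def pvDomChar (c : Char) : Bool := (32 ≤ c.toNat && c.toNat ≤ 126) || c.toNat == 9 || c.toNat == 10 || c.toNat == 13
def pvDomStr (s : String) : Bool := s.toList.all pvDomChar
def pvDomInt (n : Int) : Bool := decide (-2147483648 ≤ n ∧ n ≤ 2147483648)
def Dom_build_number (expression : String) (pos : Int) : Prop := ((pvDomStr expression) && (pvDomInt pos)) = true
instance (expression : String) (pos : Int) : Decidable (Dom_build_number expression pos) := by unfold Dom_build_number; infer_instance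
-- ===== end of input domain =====

-- B replaces A's character-by-character accumulator loop with one maximal-prefix match
-- (digits, optional dot, digits) on the tail slice; objective: idiomatic. Return value only; no mutation.

-- ===== PORT A =====
-- the while loop of A: state (result, dot_count, pos); fuel bounds the iteration count
-- (pos increases by 1 each step and the loop stops once pos ≥ len, so 2*len+1 fuel always suffices).
def build_number_loop (cs : List Char) (result : List Char) (dot_count : Int)
    (pos : Int) (fuel : Nat) : List Char × Int :=
  match fuel with
  | 0 => (result, pos)
  | fuel + 1 =>
    if pos < (cs.length : Int) then
      match PySem.List.pyGet? cs pos with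
      | none => (result, pos)   -- IndexError in Python (pos < -len): outside Pre_
      | some c =>
        if c.isDigit || (c == '.' && dot_count < 1) then
          build_number_loop cs (result ++ [c])
            (if c == '.' then dot_count + 1 else dot_count) (pos + 1) fuel
        else (result, pos)
    else (result, pos)

def build_number (expression : String) (pos : Int) : String × Int :=
  let cs := expression.toList
  let r := build_number_loop cs [] 0 pos (2 * cs.length + 1)
  -- Python raises ValueError when result == "."; those inputs are outside Pre_
  (String.ofList r.1, r.2)

-- ===== PORT B =====
-- the regex \d*(?:\.\d*)? matched greedily: digits, then optionally a dot and more digits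
def build_number_alt (expression : String) (pos : Int) : String × Int :=
  let s := PySem.List.slice expression.toList (some pos) none   -- expression[pos:]
  let ds := s.takeWhile Char.isDigit                            -- \d*
  let token :=
    match s.drop ds.length with
    | '.' :: r => ds ++ '.' :: r.takeWhile Char.isDigit         -- (?:\.\d*)?
    | _ => ds
  -- token == "." raises ValueError in Python: outside Pre_
  (String.ofList token, pos + (token.length : Int))

-- ===== PRECONDITION & SPEC =====
-- Pre_ excludes pos < -len (A raises IndexError), inputs whose token is a lone dot '.' with no
-- digit after it (both A and B raise ValueError), and negative pos whose character is a digit or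
-- a dot: there Python's negative indexing lets A's scan run off the end and wrap past position 0
-- (an artefact of A's end-relative indexing), where B's slice-based scan raises or returns a
-- different value.
def Pre_build_number (expression : String) (pos : Int) : Prop :=
  -(expression.toList.length : Int) ≤ pos ∧
  ¬ (PySem.List.pyGet? expression.toList pos = some '.' ∧
     (PySem.List.pyGet? expression.toList (pos + 1)).all (fun c => !c.isDigit) = true) ∧
  (pos < 0 →
     (PySem.List.pyGet? expression.toList pos).all (fun c => !c.isDigit && !(c == '.')) = true)
instance (expression : String) (pos : Int) : Decidable (Pre_build_number expression pos) := by
  unfold Pre_build_number; infer_instance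

def pvWitness_build_number : String × Int := ("1.25+3", 0)

def Spec_build_number (expression : String) (pos : Int) (out : String × Int) : Prop :=
  out = build_number_alt expression pos
instance (expression : String) (pos : Int) (out : String × Int) : Decidable (Spec_build_number expression pos out) := by unfold Spec_build_number; infer_instance

-- ===== CLAIM (what is proved, stated in full; the proofs are below) =====
def Claim_equal_build_number : Prop := ∀ (expression : String) (pos : Int), Dom_build_number expression pos → Pre_build_number expression pos → Spec_build_number expression pos (build_number expression pos)

-- ===== LEMMAS AND PROOFS =====

-- reference scan: what A's loop appends from the remaining tail, given the current dot_count
def pvScan (l : List Char) (dc : Int) : List Char :=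
  match l with
  | [] => []
  | c :: t =>
    if c.isDigit then c :: pvScan t dc
    else if c == '.' && dc < 1 then c :: pvScan t (dc + 1)
    else []

theorem pvScan_one (l : List Char) : pvScan l 1 = l.takeWhile Char.isDigit := by
  induction l with
  | nil => rfl
  | cons c t ih =>
    by_cases hd : c.isDigit
    · simp [pvScan, List.takeWhile, hd, ih]
    · simp [pvScan, List.takeWhile, hd]

-- pvScan with dot_count 0 is exactly B's token construction
theorem pvScan_zero (l : List Char) :
    pvScan l 0 =
      (match l.drop (l.takeWhile Char.isDigit).length with
       | '.' :: r => l.takeWhile Char.isDigit ++ '.' :: r.takeWhile Char.isDigit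
       | _ => l.takeWhile Char.isDigit) := by
  induction l with
  | nil => rfl
  | cons c t ih =>
    by_cases hd : c.isDigit
    · simp only [pvScan, hd, if_true, List.takeWhile]
      simp only [List.length_cons, List.drop_succ_cons, ih]
      cases hdrop : t.drop (t.takeWhile Char.isDigit).length with
      | nil => rfl
      | cons d r =>
        by_cases hdot : d = '.'
        · subst hdot; simp
        · split <;> simp_all
    · by_cases hdot : c = '.'
      · subst hdot
        simp [pvScan, hd, pvScan_one, List.takeWhile]
      · have : (c == '.') = false := by simp [hdot]
        simp [pvScan, hd, this, List.takeWhile]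
        split <;> simp_all

-- the loop, started at a non-negative position n with enough fuel, appends pvScan of the tail
theorem build_number_loop_eq (cs : List Char) :
    ∀ (fuel n : Nat) (result : List Char) (dc : Int),
      cs.length ≤ n + fuel →
      build_number_loop cs result dc (n : Int) fuel =
        (result ++ pvScan (cs.drop n) dc, (n : Int) + ((pvScan (cs.drop n) dc).length : Int)) := by
  intro fuel
  induction fuel with
  | zero =>
    intro n result dc hle
    have hdrop : cs.drop n = [] := List.drop_eq_nil_of_le (by omega)
    simp [build_number_loop, hdrop, pvScan]
  | succ fuel ih =>
    intro n result dc hle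
    by_cases hlt : n < cs.length
    · have hget : PySem.List.pyGet? cs (n : Int) = some cs[n] := by
        simp [PySem.List.pyGet?_natCast, List.getElem?_eq_getElem hlt]
      have hdrop : cs.drop n = cs[n] :: cs.drop (n + 1) := List.drop_eq_getElem_cons hlt
      simp only [build_number_loop, hget]
      rw [if_pos (show ((n:Int)) < (cs.length:Int) by exact_mod_cast hlt)]
      rw [hdrop]
      simp only [pvScan]
      have hcast : ((n : Int) + 1) = ((n + 1 : Nat) : Int) := by push_cast; ring
      by_cases hd : cs[n].isDigit
      · have hne : (cs[n] == '.') = false := by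
          cases h : (cs[n] == '.') with
          | false => rfl
          | true => rw [beq_iff_eq.mp h] at hd; exact absurd hd (by decide)
        rw [if_pos (by simp [hd])]
        rw [hcast, ih (n + 1) _ _ (by omega)]
        simp only [hne, Bool.false_eq_true, if_false, hd, if_true, Prod.mk.injEq]
        refine ⟨by simp, ?_⟩
        simp only [List.length_cons]
        push_cast
        omega
      · have hdd : cs[n].isDigit = false := by simpa using hd
        by_cases hdot : (cs[n] == '.' && decide (dc < 1)) = true
        · obtain ⟨heq, hdc⟩ := Bool.and_eq_true_iff.mp hdot
          rw [if_pos (by rw [hdot]; simp)]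
          rw [hcast, ih (n + 1) _ _ (by omega)]
          simp only [heq, hdc, Bool.true_and, if_true, hdd, Bool.false_eq_true, if_false, Prod.mk.injEq]
          refine ⟨by simp, ?_⟩
          simp only [List.length_cons]
          push_cast
          omega
        · rw [if_neg (by simp only [hdd, Bool.false_or]; exact hdot)]
          simp [hdd, hdot]
    · have hdrop : cs.drop n = [] := List.drop_eq_nil_of_le (by omega)
      simp only [build_number_loop]
      rw [if_neg (by exact_mod_cast hlt)]
      simp [hdrop, pvScan]

-- the loop returns immediately when the character at pos matches neither branch of the condition
theorem build_number_loop_stop (cs result : List Char) (dc : Int) (pos : Int) (fuel : Nat)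
    (hf : fuel ≠ 0)
    (hc : ∀ c, PySem.List.pyGet? cs pos = some c →
        (c.isDigit || (c == '.' && decide (dc < 1))) = false) :
    build_number_loop cs result dc pos fuel = (result, pos) := by
  cases fuel with
  | zero => exact absurd rfl hf
  | succ f =>
    simp only [build_number_loop]
    cases hg : PySem.List.pyGet? cs pos with
    | none => split <;> rfl
    | some c =>
      have := hc c hg
      split
      · simp [this]
      · rfl

-- ===== VERDICT (by name: the statement is the Claim_ definition above) =====
theorem build_number_spec : Claim_equal_build_number := by
  intro expression pos hdom hpre
  obtain ⟨hlb, -, hneg⟩ := hpre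
  unfold Spec_build_number build_number build_number_alt
  by_cases hpos : 0 ≤ pos
  · obtain ⟨n, rfl⟩ := Int.eq_ofNat_of_zero_le hpos
    dsimp only
    rw [build_number_loop_eq expression.toList (2 * expression.toList.length + 1) n [] 0 (by omega)]
    rw [PySem.List.slice_from_natCast]
    simp only [List.nil_append]
    rw [pvScan_zero]
  · -- negative pos: the character at pos is neither a digit nor a dot, so both sides return ("", pos)
    rw [Int.not_le] at hpos
    have hall := hneg hpos
    set cs := expression.toList with hcs
    obtain ⟨k, hk, rfl⟩ : ∃ k : Nat, 0 < k ∧ pos = -(k : Int) :=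
      ⟨(-pos).toNat, by omega, by omega⟩
    have hkle : k ≤ cs.length := by
      have : -(cs.length : Int) ≤ -(k : Int) := hlb
      omega
    have hget : PySem.List.pyGet? cs (-(k : Int)) = cs[cs.length - k]? :=
      PySem.List.pyGet?_neg_natCast cs k hk hkle
    have hidx : cs.length - k < cs.length := by omega
    have hsome : PySem.List.pyGet? cs (-(k : Int)) = some cs[cs.length - k] := by
      rw [hget, List.getElem?_eq_getElem hidx]
    have hch : (!cs[cs.length - k].isDigit && !(cs[cs.length - k] == '.')) = true := by
      have := hall
      rw [hsome] at this
      simpa using this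
    obtain ⟨hnd, hne⟩ := Bool.and_eq_true_iff.mp hch
    have hnd' : cs[cs.length - k].isDigit = false := by simpa using hnd
    have hne' : (cs[cs.length - k] == '.') = false := by simpa using hne
    dsimp only
    rw [build_number_loop_stop cs [] 0 (-(k : Int)) (2 * cs.length + 1) (by omega)
        (by intro c hc; rw [hsome] at hc; cases hc; simp [hnd', hne'])]
    rw [PySem.List.slice_from_neg_natCast cs k hk]
    have hdrop : cs.drop (cs.length - k) = cs[cs.length - k] :: cs.drop (cs.length - k + 1) :=
      List.drop_eq_getElem_cons hidx
    rw [hdrop]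
    simp only [List.takeWhile]
    rw [hnd']
    simp only [List.length_nil, List.drop_zero]
    have : (match cs[cs.length - k] :: cs.drop (cs.length - k + 1) with
        | '.' :: r => ([] : List Char) ++ '.' :: r.takeWhile Char.isDigit
        | _ => ([] : List Char)) = ([] : List Char) := by
      split
      · rename_i heq
        obtain ⟨hc, -⟩ := List.cons_eq_cons.mp heq
        rw [hc] at hne'
        simp at hne'
      · rfl
    rw [this]
    simp
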